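-- pv_equiv track=rewrite | github.com/jbirby/POCSAG-Pager-Codec | scripts/pocsag_common.py | encode_numeric_message
-- ===== SOURCE A (Python) =====
-- def encode_numeric_message(digits_string):
--     """
--     Encode a numeric message string to 20-bit chunks.
--     Numeric encoding: 4 bits per digit
--     0-9: normal, A=0x0A (space), B=0x0B (U), C=0x0C (hyphen), D=0x0D ([, E=0x0E (], F=0x0F (unused)
--
--     Args:
--         digits_string: String of digits and special chars
--
--     Returns:
--         List of 20-bit data values
--     """
--     # Map characters to 4-bit values
--     char_map = {
--         '0': 0x0, '1': 0x1, '2': 0x2, '3': 0x3, '4': 0x4,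
--         '5': 0x5, '6': 0x6, '7': 0x7, '8': 0x8, '9': 0x9,
--         ' ': 0xA, 'U': 0xB, '-': 0xC, '[': 0xD, ']': 0xE,
--     }
--
--     # Convert string to 4-bit values
--     nibbles = []
--     for char in digits_string:
--         if char in char_map:
--             nibbles.append(char_map[char])
--         else:
--             nibbles.append(0xF)  # Unknown = unused
--
--     # Pack nibbles into 20-bit chunks (5 nibbles per 20 bits)
--     chunks = []
--     for i in range(0, len(nibbles), 5):
--         chunk_nibbles = nibbles[i:i+5]
--         # Pad with 0xF if needed
--         while len(chunk_nibbles) < 5: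
--             chunk_nibbles.append(0xF)
--
--         # Pack MSB first
--         value = 0
--         for nibble in chunk_nibbles:
--             value = (value << 4) | nibble
--         chunks.append(value & 0xFFFFF)
--
--     return chunks
-- ===== SOURCE B (Python) =====
-- _NIBBLE = {
--     '0': 0x0, '1': 0x1, '2': 0x2, '3': 0x3, '4': 0x4,
--     '5': 0x5, '6': 0x6, '7': 0x7, '8': 0x8, '9': 0x9,
--     ' ': 0xA, 'U': 0xB, '-': 0xC, '[': 0xD, ']': 0xE,
-- }
--
--
-- def encode_numeric_message(digits_string):
--     """Single streaming pass: shift each nibble into an accumulator, emit every 5."""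
--     chunks = []
--     value = 0
--     count = 0
--     for ch in digits_string:
--         value = (value << 4) | _NIBBLE.get(ch, 0xF)
--         count += 1
--         if count == 5:
--             chunks.append(value & 0xFFFFF)
--             value = 0
--             count = 0
--     if count:
--         while count < 5:
--             value = (value << 4) | 0xF
--             count += 1
--         chunks.append(value & 0xFFFFF)
--     return chunks
-- ===== Notes on version B (the rewrite author's own statement) =====
-- stated objective: alternative
-- what changed: Replaces A's two materialized passes (build a nibble list, then slice/pad/pack it in groups of 5) with a single streaming loop over the characters that keeps only a running accumulator and a nibble count, emitting each 20-bit chunk as soon as 5 nibbles are in and padding the trailing partial group once at the end.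
import Mathlib
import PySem

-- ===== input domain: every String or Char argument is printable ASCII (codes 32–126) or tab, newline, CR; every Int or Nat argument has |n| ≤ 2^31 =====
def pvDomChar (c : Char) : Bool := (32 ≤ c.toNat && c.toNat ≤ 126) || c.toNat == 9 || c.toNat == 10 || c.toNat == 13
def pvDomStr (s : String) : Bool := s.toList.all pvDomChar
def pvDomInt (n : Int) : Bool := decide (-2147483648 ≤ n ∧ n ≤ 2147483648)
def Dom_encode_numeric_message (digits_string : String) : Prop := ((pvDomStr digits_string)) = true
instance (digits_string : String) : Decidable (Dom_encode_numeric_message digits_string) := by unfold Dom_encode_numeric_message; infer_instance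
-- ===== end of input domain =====

-- B replaces A's two materialized passes (nibble list, then slice/pad/pack per group of 5)
-- by one streaming loop keeping only a running accumulator and a nibble count (objective: alternative decomposition, same cost).

-- ===== PORT A =====
-- char_map of A (and of B's _NIBBLE: the same table)
def pvCharMap : PySem.Dict Char Int := PySem.Dict.ofList
  [('0', 0x0), ('1', 0x1), ('2', 0x2), ('3', 0x3), ('4', 0x4),
   ('5', 0x5), ('6', 0x6), ('7', 0x7), ('8', 0x8), ('9', 0x9),
   (' ', 0xA), ('U', 0xB), ('-', 0xC), ('[', 0xD), (']', 0xE)]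

-- A's 'while len(chunk_nibbles) < 5: chunk_nibbles.append(0xF)'
def pvPadWhile (l : List Int) : List Int :=
  if l.length < 5 then pvPadWhile (l ++ [15]) else l
termination_by 5 - l.length
decreasing_by simp; omega

def encode_numeric_message (digits_string : String) : List Int :=
  let nibbles := digits_string.toList.foldl
    (fun acc c => if pvCharMap.contains c then acc ++ [pvCharMap.getD c 0] else acc ++ [0xF]) []
  (PySem.List.pyRange 0 (nibbles.length : Int) 5).foldl
    (fun chunks i =>
      let chunk_nibbles := pvPadWhile (PySem.List.slice nibbles (some i) (some (i + 5)))
      let value := chunk_nibbles.foldl (fun v n => PySem.Int.bor (v <<< (4 : Nat)) n) 0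
      chunks ++ [PySem.Int.band value 0xFFFFF]) []

-- ===== PORT B =====
-- B's trailing 'while count < 5: value = (value << 4) | 0xF; count += 1'
def pvPadVal (value count : Int) : Int :=
  if count < 5 then pvPadVal (PySem.Int.bor (value <<< (4 : Nat)) 0xF) (count + 1) else value
termination_by (5 - count).toNat
decreasing_by omega

-- B's loop body: shift in one nibble, emit a 20-bit chunk whenever 5 are in
def pvStepB (st : List Int × Int × Int) (ch : Char) : List Int × Int × Int :=
  let value := PySem.Int.bor (st.2.1 <<< (4 : Nat)) ((pvCharMap.get? ch).getD 0xF)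
  let count := st.2.2 + 1
  if count == 5 then (st.1 ++ [PySem.Int.band value 0xFFFFF], 0, 0)
  else (st.1, value, count)

-- B's epilogue: pad and flush a partial trailing group
def pvFinishB (st : List Int × Int × Int) : List Int :=
  if st.2.2 ≠ 0 then st.1 ++ [PySem.Int.band (pvPadVal st.2.1 st.2.2) 0xFFFFF] else st.1

def encode_numeric_message_alt (digits_string : String) : List Int :=
  pvFinishB (digits_string.toList.foldl pvStepB ([], 0, 0))

-- ===== PRECONDITION & SPEC =====
def Spec_encode_numeric_message (digits_string : String) (out : List Int) : Prop := out = encode_numeric_message_alt digits_string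
instance (digits_string : String) (out : List Int) : Decidable (Spec_encode_numeric_message digits_string out) := by unfold Spec_encode_numeric_message; infer_instance

-- ===== CLAIM (what is proved, stated in full; the proofs are below) =====
def Claim_equal_encode_numeric_message : Prop := ∀ (digits_string : String), Dom_encode_numeric_message digits_string → Spec_encode_numeric_message digits_string (encode_numeric_message digits_string)

-- ===== LEMMAS AND PROOFS =====

-- nibble of one character (shared reference semantics of both programs)
def pvF (c : Char) : Int := (pvCharMap.get? c).getD 0xF

-- pack a nibble list MSB first
def pvPack (l : List Int) : Int := l.foldl (fun v n => PySem.Int.bor (v <<< (4 : Nat)) n) 0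

-- reference result: chunks of 5 nibbles, last one padded
def pvGrp : List Int → List Int
  | [] => []
  | n :: ns =>
    PySem.Int.band (pvPack (pvPadWhile ((n :: ns).take 5))) 0xFFFFF :: pvGrp ((n :: ns).drop 5)
termination_by l => l.length
decreasing_by simp

theorem pvGrp_eq (ns : List Int) (h : ns ≠ []) :
    pvGrp ns = PySem.Int.band (pvPack (pvPadWhile (ns.take 5))) 0xFFFFF :: pvGrp (ns.drop 5) := by
  match ns with
  | [] => exact absurd rfl h
  | n :: ns => rw [pvGrp]

theorem pvPack_snoc (l : List Int) (x : Int) :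
    pvPack (l ++ [x]) = PySem.Int.bor (pvPack l <<< (4 : Nat)) x := by
  simp [pvPack, List.foldl_append]

-- A's per-chunk value at start index i
def pvChunkAt (ns : List Int) (i : Int) : Int :=
  PySem.Int.band (pvPack (pvPadWhile (PySem.List.slice ns (some i) (some (i + 5))))) 0xFFFFF

theorem pvChunkAt_shift (ns : List Int) (k : Nat) :
    pvChunkAt ns (5 * ((k : Int) + 1)) = pvChunkAt (ns.drop 5) (5 * (k : Int)) := by
  have h1 : (5 * ((k : Int) + 1)).toNat = 5 * k + 5 := by omega
  have h2 : (5 * ((k : Int) + 1) + 5).toNat = 5 * k + 10 := by omega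
  have h3 : (5 * (k : Int)).toNat = 5 * k := by omega
  have h4 : (5 * (k : Int) + 5).toNat = 5 * k + 5 := by omega
  unfold pvChunkAt
  rw [PySem.List.slice_toNat ns (by omega) (by omega),
      PySem.List.slice_toNat (ns.drop 5) (by omega) (by omega), h1, h2, h3, h4,
      List.drop_drop]
  rw [show (5 * k + 10) - (5 * k + 5) = (5 * k + 5) - 5 * k from by omega, Nat.add_comm 5 (5 * k)]

theorem pvGrp_of_range : ∀ (m : Nat) (ns : List Int), m = (ns.length + 4) / 5 →
    (List.range m).map (fun (k : Nat) => pvChunkAt ns (5 * (k : Int))) = pvGrp ns := by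
  intro m
  induction m with
  | zero =>
    intro ns h
    have : ns = [] := by
      cases ns with
      | nil => rfl
      | cons a l => exact absurd h (by simp only [List.length_cons]; omega)
    simp [this, pvGrp]
  | succ m ih =>
    intro ns h
    have hne : ns ≠ [] := by
      intro he; rw [he] at h; simp at h
    rw [List.range_succ_eq_map, List.map_cons, List.map_map, pvGrp_eq ns hne]
    congr 1
    · rw [show (5 * ((0 : Nat) : Int)) = 0 by norm_num]
      rw [pvChunkAt, PySem.List.slice_zero_start, show ((0 : Int) + 5) = 5 by norm_num,
          PySem.List.slice_to _ (by norm_num)]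
      rfl
    · rw [show ((fun (k : Nat) => pvChunkAt ns (5 * (k : Int))) ∘ Nat.succ)
            = fun (k : Nat) => pvChunkAt (ns.drop 5) (5 * (k : Int)) from
          funext fun k => by
            simp only [Function.comp_apply, Nat.succ_eq_add_one, Nat.cast_add, Nat.cast_one]
            exact pvChunkAt_shift ns k]
      apply ih
      have hlen : 1 ≤ ns.length := by
        cases ns with
        | nil => exact absurd rfl hne
        | cons a l => simp
      simp only [List.length_drop]
      omega

-- A computes pvGrp of the mapped nibbles
theorem encodeA_eq (s : String) :
    encode_numeric_message s = pvGrp (s.toList.map pvF) := by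
  have hbody : (fun (acc : List Int) (c : Char) =>
      if pvCharMap.contains c then acc ++ [pvCharMap.getD c 0] else acc ++ [0xF])
      = fun acc c => acc ++ [pvF c] := by
    funext acc c
    by_cases h : pvCharMap.contains c
    · have hs : (pvCharMap.get? c).isSome := by
        rw [← PySem.Dict.contains_eq_isSome_get?]; exact h
      obtain ⟨v, hv⟩ := Option.isSome_iff_exists.mp hs
      simp [h, pvF, hv, PySem.Dict.getD_eq_get?_getD]
    · have hn : pvCharMap.get? c = none := by
        have := PySem.Dict.contains_eq_isSome_get? pvCharMap c
        rw [Bool.eq_false_iff.mpr h] at this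
        exact Option.not_isSome_iff_eq_none.mp (by rw [← this]; simp)
      simp [h, pvF, hn]
  have key : ∀ ns : List Int,
      (PySem.List.pyRange 0 (ns.length : Int) 5).foldl
        (fun chunks i => chunks ++ [pvChunkAt ns i]) [] = pvGrp ns := by
    intro ns
    rw [PySem.List.foldl_append_singleton_eq_map, List.nil_append,
        PySem.List.pyRange_of_pos 0 (ns.length : Int) (by norm_num), List.map_map]
    have hm : (if (0 : Int) < (ns.length : Int)
        then (((ns.length : Int) - 0 + 5 - 1) / 5).toNat else 0) = (ns.length + 4) / 5 := by
      split_ifs with h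
      · omega
      · omega
    rw [hm]
    rw [show ((fun i => pvChunkAt ns i) ∘ fun (k : Nat) => (0 : Int) + 5 * (k : Int))
          = fun (k : Nat) => pvChunkAt ns (5 * (k : Int)) from funext fun k => by simp]
    exact pvGrp_of_range _ ns rfl
  unfold encode_numeric_message
  rw [hbody, PySem.List.foldl_append_singleton_eq_map pvF s.toList [], List.nil_append]
  exact key (s.toList.map pvF)

-- padding a value agrees with padding the list
theorem pvPadVal_eq_pack_padWhile : ∀ l : List Int,
    pvPadVal (pvPack l) (l.length : Int) = pvPack (pvPadWhile l) := by
  intro l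
  fun_induction pvPadWhile l with
  | case1 l h ih =>
    rw [pvPadVal]
    have hc : ((l.length : Int) < 5) := by exact_mod_cast h
    rw [if_pos hc, ← pvPack_snoc]
    have : (l.length : Int) + 1 = ((l ++ [(15 : Int)]).length : Int) := by simp
    rw [this]
    exact ih
  | case2 l h =>
    rw [pvPadVal, if_neg (by exact_mod_cast h)]

-- the streaming loop invariant of B
theorem pvB_inv : ∀ (cs : List Char) (chunks p : List Int), p.length < 5 →
    pvFinishB (cs.foldl pvStepB (chunks, pvPack p, (p.length : Int)))
      = chunks ++ pvGrp (p ++ cs.map pvF) := by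
  intro cs
  induction cs with
  | nil =>
    intro chunks p hp
    simp only [List.foldl_nil, List.map_nil, List.append_nil]
    cases p with
    | nil => simp [pvFinishB, pvGrp]
    | cons x xs =>
      have hne : (x :: xs : List Int) ≠ [] := by simp
      rw [pvFinishB]
      rw [if_pos (by simp only [List.length_cons]; omega)]
      rw [pvPadVal_eq_pack_padWhile, pvGrp_eq _ hne,
          List.take_of_length_le (by omega), List.drop_eq_nil_of_le (by omega), pvGrp]
  | cons c cs ih =>
    intro chunks p hp
    rw [List.foldl_cons]
    have hstep : pvStepB (chunks, pvPack p, (p.length : Int)) c =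
        if ((p.length : Int) + 1) == 5
        then (chunks ++ [PySem.Int.band (pvPack (p ++ [pvF c])) 0xFFFFF], 0, 0)
        else (chunks, pvPack (p ++ [pvF c]), (p.length : Int) + 1) := by
      rw [pvStepB]; rw [pvPack_snoc]; rfl
    by_cases h4 : p.length = 4
    · rw [hstep, if_pos (by simp [h4])]
      have h0 : ((0 : Int), (0 : Int)) = (pvPack ([] : List Int), ((([] : List Int)).length : Int)) := by
        simp [pvPack]
      rw [show ((chunks ++ [PySem.Int.band (pvPack (p ++ [pvF c])) 0xFFFFF], (0:Int), (0:Int))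
            = (chunks ++ [PySem.Int.band (pvPack (p ++ [pvF c])) 0xFFFFF],
               pvPack ([] : List Int), ((([] : List Int)).length : Int))) by simp [pvPack]]
      rw [ih _ [] (by simp)]
      simp only [List.map_cons, List.nil_append]
      have hq : (p ++ [pvF c]).length = 5 := by simp [h4]
      have hqne : p ++ pvF c :: cs.map pvF ≠ [] := by simp
      rw [pvGrp_eq _ hqne]
      have hsplit : p ++ pvF c :: cs.map pvF = (p ++ [pvF c]) ++ cs.map pvF := by simp
      rw [hsplit, List.take_left' hq, List.drop_left' hq]
      have hpadq : pvPadWhile (p ++ [pvF c]) = p ++ [pvF c] := by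
        rw [pvPadWhile, if_neg (by omega)]
      rw [hpadq]
      simp
    · have hlt : (p.length : Int) + 1 ≠ 5 := by omega
      rw [hstep, if_neg (by simpa using hlt)]
      have hlen : ((p ++ [pvF c]).length : Int) = (p.length : Int) + 1 := by simp
      rw [show ((chunks, pvPack (p ++ [pvF c]), (p.length : Int) + 1)
            = (chunks, pvPack (p ++ [pvF c]), ((p ++ [pvF c]).length : Int))) by rw [hlen]]
      rw [ih _ (p ++ [pvF c]) (by simp; omega)]
      simp

-- B computes pvGrp of the mapped nibbles
theorem encodeB_eq (s : String) :
    encode_numeric_message_alt s = pvGrp (s.toList.map pvF) := by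
  unfold encode_numeric_message_alt
  have := pvB_inv s.toList [] [] (by simp)
  simpa [pvPack] using this

-- ===== VERDICT (by name: the statement is the Claim_ definition above) =====
theorem encode_numeric_message_spec : Claim_equal_encode_numeric_message := by
  intro s _
  unfold Spec_encode_numeric_message
  rw [encodeA_eq, encodeB_eq]
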